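-- pv_equiv track=rewrite | github.com/teqn99/Code_Practice | 02_Programmers/Feb/10_폰켓몬.py | solution
-- ===== SOURCE A (Python) =====
-- def solution(nums):
--     answer = [0]
--
--     for i in range(len(nums)):
--         if answer[-1] != nums[i]:
--             if nums[i] not in answer:
--                 answer.append(nums[i])
--
--         if len(answer[1:]) == (len(nums) // 2):
--             break
--
--     return len(answer[1:])
-- ===== SOURCE B (Python) =====
-- def solution(nums):
--     return min(len(set(nums)), len(nums) // 2)
-- ===== Notes on version B (the rewrite author's own statement) =====
-- stated objective: idiomatic
-- what changed: B replaces A's growing answer list with repeated membership scans and an early break by the one-liner min(len(set(nums)), len(nums)//2).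
-- intended difference: On one-element lists [x] with x != 0 A returns 1 (its break check never fires though the cap is 0), and on lists containing 0 whose distinct nonzero values number fewer than len//2 A's sentinel 0 makes it skip counting the value 0 and undercount by one; B returns min(#distinct values, len//2), the intended value of this count-distinct-capped task. — e.g. on solution([1, 0, 0, 0]): A returns 1, B returns 2
import Mathlib
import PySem

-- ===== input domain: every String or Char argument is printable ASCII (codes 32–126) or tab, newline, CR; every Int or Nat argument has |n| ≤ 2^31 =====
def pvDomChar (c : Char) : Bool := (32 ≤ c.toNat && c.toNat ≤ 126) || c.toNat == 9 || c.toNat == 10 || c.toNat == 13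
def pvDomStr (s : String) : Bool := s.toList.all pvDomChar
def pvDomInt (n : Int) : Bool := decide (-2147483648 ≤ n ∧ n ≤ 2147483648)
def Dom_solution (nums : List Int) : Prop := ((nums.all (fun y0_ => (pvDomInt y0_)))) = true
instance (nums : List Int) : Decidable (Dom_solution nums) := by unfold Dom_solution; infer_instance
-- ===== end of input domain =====

-- B replaces A's growing membership-scanned list (seeded with a 0 sentinel) by the
-- idiomatic min(len(set(nums)), len(nums)//2); A's sentinel makes it miscount on the
-- D_solution corner inputs, where B returns the intended value.

-- ===== PORT A =====
-- the loop of A: `answer` is the accumulator list (seeded [0]); break becomes an early return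
def solutionGo (cap : Nat) (answer : List Int) : List Int → List Int
  | [] => answer
  | x :: rest =>
      let answer' :=
        if answer.getLastD 0 ≠ x then           -- answer[-1] != nums[i] (answer is never empty)
          (if x ∉ answer then answer ++ [x] else answer)
        else answer
      if (answer'.drop 1).length = cap then answer'   -- len(answer[1:]) == len(nums)//2: break
      else solutionGo cap answer' rest

def solution (nums : List Int) : Int :=
  (((solutionGo (nums.length / 2) [0] nums).drop 1).length : Int)

-- ===== PORT B =====
def solution_alt (nums : List Int) : Int :=
  min ((PySem.Set.ofList nums).length : Int) (PySem.Int.floordiv (nums.length : Int) 2)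

-- ===== PRECONDITION & SPEC =====
-- On a one-element list [x] with x ≠ 0 A returns 1 (its break check never fires), and on lists
-- containing 0 with fewer distinct nonzero values than len//2 A's sentinel 0 makes it skip the
-- value 0, so A undercounts; B returns min(#distinct, len//2), the intended value.
def D_solution (nums : List Int) : Prop :=
  (nums.length = 1 ∧ nums ≠ [0]) ∨
  (0 ∈ nums ∧ (nums.filter (fun x => x ≠ 0)).toFinset.card < nums.length / 2)
instance (nums : List Int) : Decidable (D_solution nums) := by unfold D_solution; infer_instance

def Spec_solution (nums : List Int) (out : Int) : Prop := ¬ D_solution nums → out = solution_alt nums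
instance (nums : List Int) (out : Int) : Decidable (Spec_solution nums out) := by unfold Spec_solution; infer_instance

def pvDiffWitness_solution : List Int := [1, 0, 0, 0]
def pvDiffWitnessOut_solution : Int × Int := (1, 2)

-- ===== CLAIM (what is proved, stated in full; the proofs are below) =====
def Claim_unchanged_solution : Prop := ∀ (nums : List Int), Dom_solution nums → Spec_solution nums (solution nums)
def Claim_changed_solution : Prop := Dom_solution (pvDiffWitness_solution) ∧ D_solution (pvDiffWitness_solution) ∧ solution (pvDiffWitness_solution) = pvDiffWitnessOut_solution.1 ∧ solution_alt (pvDiffWitness_solution) = pvDiffWitnessOut_solution.2 ∧ pvDiffWitnessOut_solution.1 ≠ pvDiffWitnessOut_solution.2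
def Claim_exact_solution : Prop := ∀ (nums : List Int), Dom_solution nums → D_solution nums → solution nums ≠ solution_alt nums

-- ===== LEMMAS AND PROOFS =====
theorem card_insert_erase (B : Finset Int) (x : Int) :
    (insert x B).card = (B.erase x).card + 1 := by
  rw [← Finset.card_insert_of_notMem (Finset.notMem_erase x B)]
  congr 1
  ext y; by_cases h : y = x <;> simp [h]

theorem getLastD_cons_mem (a d : Int) (l : List Int) : (a :: l).getLastD d ∈ a :: l := by
  induction l generalizing a with
  | nil => simp
  | cons b t ih => simpa using Or.inr (ih b)

-- A's loop computes min (|s| + #(new distinct values of rest)) cap, starting from answer = 0::s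
theorem go_spec (rest : List Int) : ∀ (s : List Int) (cap : Nat),
    (0 :: s).Nodup → s.length < cap →
    ((solutionGo cap (0 :: s) rest).drop 1).length
      = min (s.length + (rest.toFinset \ (0 :: s).toFinset).card) cap := by
  induction rest with
  | nil => intro s cap _ hlt; simp [solutionGo]; omega
  | cons x rest ih =>
    intro s cap hnd hlt
    by_cases hx : x ∈ (0 :: s)
    · have hstep : solutionGo cap (0 :: s) (x :: rest)
          = if ((0 :: s).drop 1).length = cap then (0 :: s)
            else solutionGo cap (0 :: s) rest := by
        simp only [solutionGo]
        split_ifs with h1 h2 <;> simp_all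
      rw [hstep, if_neg (by simpa using Nat.ne_of_lt hlt)]
      rw [ih s cap hnd hlt]
      have : (x :: rest).toFinset \ (0 :: s).toFinset = rest.toFinset \ (0 :: s).toFinset := by
        simp only [List.toFinset_cons]
        exact Finset.insert_sdiff_of_mem _ (by simpa using hx)
      rw [this]
    · have hlast : (0 :: s).getLastD 0 ≠ x := fun h => hx (h ▸ getLastD_cons_mem 0 0 s)
      have hstep : solutionGo cap (0 :: s) (x :: rest)
          = if (((0 :: s) ++ [x]).drop 1).length = cap then ((0 :: s) ++ [x])
            else solutionGo cap ((0 :: s) ++ [x]) rest := by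
        simp only [solutionGo, if_pos hlast, if_pos hx]
      have hTins : (0 :: (s ++ [x])).toFinset = insert x (0 :: s).toFinset := by
        ext y; simp; tauto
      have hcard : ((x :: rest).toFinset \ (0 :: s).toFinset).card
          = (rest.toFinset \ (0 :: (s ++ [x])).toFinset).card + 1 := by
        have hx' : x ∉ (0 :: s).toFinset := by simpa using hx
        rw [List.toFinset_cons, Finset.insert_sdiff_of_notMem _ hx', card_insert_erase,
          hTins, Finset.sdiff_insert]
      by_cases hbrk : s.length + 1 = cap
      · rw [hstep]
        rw [if_pos (by simp; omega)]
        simp only [List.cons_append, List.drop_succ_cons, List.drop_zero, List.length_append,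
          List.length_cons, List.length_nil]
        omega
      · have hnd' : (0 :: (s ++ [x])).Nodup := by
          simp only [List.nodup_cons] at hnd ⊢
          simp only [List.mem_cons, not_or] at hx
          refine ⟨by simp [hnd.1]; tauto, ?_⟩
          simp [List.nodup_append, hnd.2]
          intro a ha rfl; exact hx.2 ha
        rw [hstep, if_neg (by simp; omega)]
        have hrec := ih (s ++ [x]) cap hnd' (by simp; omega)
        simp only [List.cons_append] at hrec ⊢
        rw [hrec]
        simp only [List.length_append, List.length_cons, List.length_nil]
        omega

theorem ofList_length_eq_card (xs : List Int) :
    (PySem.Set.ofList xs).length = xs.toFinset.card := by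
  have h1 : (PySem.Set.ofList xs).toFinset = xs.toFinset := by
    ext y; simp [PySem.Set.mem_ofList]
  rw [← h1, List.toFinset_card_of_nodup (PySem.Set.nodup_ofList xs)]

theorem filter_toFinset_eq_erase (nums : List Int) :
    (nums.filter (fun x => x ≠ 0)).toFinset = nums.toFinset.erase 0 := by
  ext y; simp; tauto

theorem alt_eq (nums : List Int) :
    solution_alt nums = ((min nums.toFinset.card (nums.length / 2) : Nat) : Int) := by
  unfold solution_alt
  rw [ofList_length_eq_card]
  rw [show ((2 : Int) = ((2 : Nat) : Int)) from rfl, PySem.Int.floordiv_natCast, Nat.cast_min]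

theorem sol_eq_of_cap_pos (nums : List Int) (hcap : 1 ≤ nums.length / 2) :
    solution nums = ((min (nums.toFinset.erase 0).card (nums.length / 2) : Nat) : Int) := by
  unfold solution
  rw [go_spec nums [] (nums.length / 2) (by simp) (by exact hcap)]
  simp [Finset.sdiff_singleton_eq_erase]

theorem erase_card_facts (nums : List Int) :
    (nums.toFinset.erase 0).card ≤ nums.toFinset.card ∧
    (0 ∈ nums → (nums.toFinset.erase 0).card + 1 = nums.toFinset.card) ∧
    (0 ∉ nums → nums.toFinset.erase 0 = nums.toFinset) := by
  refine ⟨Finset.card_le_card (Finset.erase_subset _ _), ?_, ?_⟩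
  · intro h; exact Finset.card_erase_add_one (by simpa using h)
  · intro h; exact Finset.erase_eq_of_notMem (by simpa using h)

-- ===== VERDICT (by name: the statement is the Claim_ definition above) =====
theorem solution_spec : Claim_unchanged_solution := by
  intro nums _ hD
  unfold D_solution at hD
  push Not at hD
  rw [alt_eq]
  match nums, hD with
  | [], _ => decide
  | [a], h =>
    have h0 : [a] = [0] := h.1 (by simp)
    have ha : a = 0 := by simpa using h0
    subst ha; decide
  | (a :: b :: t), h =>
    set nums := (a :: b :: t) with hn
    have hcap : 1 ≤ nums.length / 2 := by simp [hn]; omega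
    rw [sol_eq_of_cap_pos nums hcap]
    obtain ⟨hle, h0in, h0out⟩ := erase_card_facts nums
    by_cases hz : 0 ∈ nums
    · have := h.2 hz
      rw [filter_toFinset_eq_erase] at this
      have := h0in hz
      congr 1; omega
    · rw [h0out hz]

theorem solution_changed : Claim_changed_solution := by
  unfold Claim_changed_solution; decide

theorem solution_tight : Claim_exact_solution := by
  intro nums _ hD
  unfold D_solution at hD
  rw [alt_eq]
  rcases hD with ⟨hlen, hne⟩ | ⟨hz, hlt⟩
  · match nums, hlen, hne with
    | [a], _, hne =>
      have ha : a ≠ 0 := fun h => hne (by simp [h])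
      simp [solution, solutionGo, ha, Ne.symm ha]
  · rw [filter_toFinset_eq_erase] at hlt
    obtain ⟨hle, h0in, _⟩ := erase_card_facts nums
    have hcap : 1 ≤ nums.length / 2 := by omega
    rw [sol_eq_of_cap_pos nums hcap]
    have := h0in hz
    intro hEq
    have : min (nums.toFinset.erase 0).card (nums.length / 2)
        = min nums.toFinset.card (nums.length / 2) := by exact_mod_cast hEq
    omega
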